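-- pv_equiv track=rewrite | github.com/ksaubhri12/ds_algo | practice_450/array/26_subset_another_array.py | subset_another_array
-- ===== SOURCE A (Python) =====
-- def subset_another_array(arr1: [], arr2: [], n, m):
--     dict_1 = {}
--
--     dict_2 = {}
--
--     set_dict_from_arr(arr1, n, dict_1)
--     set_dict_from_arr(arr2, m, dict_2)
--
--     for key in dict_2.keys():
--         if key not in dict_1:
--             return 'No'
--         else:
--             count_key = dict_2[key]
--             count_in_another = dict_1[key]
--             if count_in_another != count_key:
--                 return 'No'
--
--     return 'Yes'
--
-- def set_dict_from_arr(arr: [], n, arr_dict: {}):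
--     for i in range(0, n):
--         element = arr[i]
--         if element in arr_dict:
--             arr_dict[element] = arr_dict[element] + 1
--         else:
--             arr_dict[element] = 1
-- ===== SOURCE B (Python) =====
-- def subset_another_array(arr1: [], arr2: [], n, m):
--     counts = {}
--     for i in range(0, m):
--         key = arr2[i]
--         counts[key] = counts.get(key, 0) + 1
--     for i in range(0, n):
--         key = arr1[i]
--         if key in counts:
--             counts[key] = counts[key] - 1
--     return 'Yes' if all(v == 0 for v in counts.values()) else 'No'
-- ===== Notes on version B (the rewrite author's own statement) =====
-- stated objective: alternative
-- what changed: Replaces the build-two-frequency-dicts-then-compare strategy with a single frequency dict for arr2 that is cancelled by one decrementing pass over arr1, returning Yes iff every remaining count is zero.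
import Mathlib
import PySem

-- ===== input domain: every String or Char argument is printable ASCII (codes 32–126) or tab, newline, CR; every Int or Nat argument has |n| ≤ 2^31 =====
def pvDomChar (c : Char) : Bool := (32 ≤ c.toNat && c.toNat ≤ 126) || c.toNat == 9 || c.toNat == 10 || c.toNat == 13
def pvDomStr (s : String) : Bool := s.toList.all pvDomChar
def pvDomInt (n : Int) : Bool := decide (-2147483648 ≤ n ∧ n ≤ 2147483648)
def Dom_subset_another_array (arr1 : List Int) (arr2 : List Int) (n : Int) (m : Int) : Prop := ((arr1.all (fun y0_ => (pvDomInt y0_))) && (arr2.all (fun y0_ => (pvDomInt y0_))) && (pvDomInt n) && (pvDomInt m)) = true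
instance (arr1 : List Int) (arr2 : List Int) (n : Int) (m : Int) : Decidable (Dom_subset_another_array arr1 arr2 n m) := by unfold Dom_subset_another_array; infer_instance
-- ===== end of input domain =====

-- B replaces A's two frequency dicts compared key-by-key with one frequency dict for arr2
-- cancelled by a decrementing pass over arr1 (alternative decomposition, same cost).

-- ===== PORT A =====
-- set_dict_from_arr(arr, n, arr_dict): count occurrences of arr[0..n) into the dict
def setDictFromArr (arr : List Int) (n : Int) (d : PySem.Dict Int Int) : PySem.Dict Int Int :=
  (PySem.List.pyRange 0 n 1).foldl (fun d i =>
    let element := PySem.List.pyGetD arr i 0   -- arr[i]; Pre_ guarantees i is in range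
    if d.contains element then d.insert element (d.getD element 0 + 1)
    else d.insert element 1) d

-- the 'for key in dict_2.keys(): … return 'No' … / return 'Yes'' loop, with early return
def checkKeysLoop (keys : List Int) (dict1 dict2 : PySem.Dict Int Int) : String :=
  match keys with
  | [] => "Yes"
  | key :: rest =>
    if dict1.contains key = false then "No"
    else
      let count_key := dict2.getD key 0
      let count_in_another := dict1.getD key 0
      if count_in_another ≠ count_key then "No"
      else checkKeysLoop rest dict1 dict2

def subset_another_array (arr1 : List Int) (arr2 : List Int) (n : Int) (m : Int) : String :=
  let dict_1 := setDictFromArr arr1 n PySem.Dict.empty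
  let dict_2 := setDictFromArr arr2 m PySem.Dict.empty
  checkKeysLoop dict_2.keys dict_1 dict_2

-- ===== PORT B =====
def subset_another_array_alt (arr1 : List Int) (arr2 : List Int) (n : Int) (m : Int) : String :=
  let counts := (PySem.List.pyRange 0 m 1).foldl (fun d i =>
      let key := PySem.List.pyGetD arr2 i 0    -- arr2[i]; Pre_ guarantees i is in range
      d.insert key (d.getD key 0 + 1)) (PySem.Dict.empty : PySem.Dict Int Int)
  let counts2 := (PySem.List.pyRange 0 n 1).foldl (fun d i =>
      let key := PySem.List.pyGetD arr1 i 0    -- arr1[i]; Pre_ guarantees i is in range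
      if d.contains key then d.insert key (d.getD key 0 - 1) else d) counts
  if counts2.values.all (fun v => v == 0) then "Yes" else "No"

-- ===== PRECONDITION & SPEC =====
-- A raises IndexError iff n > len(arr1) or m > len(arr2); exactly those inputs are excluded.
def Pre_subset_another_array (arr1 : List Int) (arr2 : List Int) (n : Int) (m : Int) : Prop :=
  n ≤ (arr1.length : Int) ∧ m ≤ (arr2.length : Int)
instance (arr1 : List Int) (arr2 : List Int) (n : Int) (m : Int) : Decidable (Pre_subset_another_array arr1 arr2 n m) := by unfold Pre_subset_another_array; infer_instance

def pvWitness_subset_another_array : List Int × List Int × Int × Int := ([1, 2, 3], [3, 1], 3, 2)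

def Spec_subset_another_array (arr1 : List Int) (arr2 : List Int) (n : Int) (m : Int) (out : String) : Prop := out = subset_another_array_alt arr1 arr2 n m
instance (arr1 : List Int) (arr2 : List Int) (n : Int) (m : Int) (out : String) : Decidable (Spec_subset_another_array arr1 arr2 n m out) := by unfold Spec_subset_another_array; infer_instance

-- ===== CLAIM (what is proved, stated in full; the proofs are below) =====
def Claim_equal_subset_another_array : Prop := ∀ (arr1 : List Int) (arr2 : List Int) (n : Int) (m : Int), Dom_subset_another_array arr1 arr2 n m → Pre_subset_another_array arr1 arr2 n m → Spec_subset_another_array arr1 arr2 n m (subset_another_array arr1 arr2 n m)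

-- ===== LEMMAS AND PROOFS =====

-- a fold over range(0, n) reading xs[i] is a fold over the prefix xs.take n.toNat (n ≤ len xs)
theorem foldl_pyRange_take {β : Type} (xs : List Int) (n : Int) (hn : n ≤ (xs.length : Int))
    (f : β → Int → β) (init : β) :
    (PySem.List.pyRange 0 n 1).foldl (fun acc i => f acc (PySem.List.pyGetD xs i 0)) init
      = (xs.take n.toNat).foldl f init := by
  by_cases h : n ≤ 0
  · rw [PySem.List.pyRange_one_eq_nil (by omega)]
    have h0 : n.toNat = 0 := by omega
    simp [h0]
  · have h1 : (PySem.List.pyRange 0 n 1).foldl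
        (fun acc i => f acc (PySem.List.pyGetD xs i 0)) init
      = (PySem.List.pyRange 0 n 1).foldl
        (fun acc i => f acc (PySem.List.pyGetD (xs.take n.toNat) i 0)) init := by
      apply PySem.List.foldl_congr_mem
      intro acc i hi
      rw [PySem.List.mem_pyRange_one] at hi
      congr 1
      rw [PySem.List.pyGetD_of_nonneg _ _ hi.1, PySem.List.pyGetD_of_nonneg _ _ hi.1]
      have hterm : i.toNat < n.toNat := by omega
      rw [List.getD_eq_getElem?_getD, List.getD_eq_getElem?_getD, List.getElem?_take]
      simp [hterm]
    have h2 := PySem.List.foldl_pyRange_zero_pyGetD (xs.take n.toNat) 0 f init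
    have hlen : PySem.List.len (xs.take n.toNat) = n := by
      rw [PySem.List.len_eq]; simp; omega
    rw [hlen] at h2
    rw [h1, h2]

-- the three index loops of the two ports, as folds over list prefixes
theorem setDict_take (arr : List Int) (n : Int) (hn : n ≤ (arr.length : Int)) :
    (PySem.List.pyRange 0 n 1).foldl (fun d i =>
        let element := PySem.List.pyGetD arr i 0
        if d.contains element then d.insert element (d.getD element 0 + 1)
        else d.insert element 1) (PySem.Dict.empty : PySem.Dict Int Int)
      = (arr.take n.toNat).foldl (fun d e =>
          if d.contains e then d.insert e (d.getD e 0 + 1)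
          else d.insert e 1) PySem.Dict.empty :=
  foldl_pyRange_take arr n hn
    (fun (d : PySem.Dict Int Int) e =>
      if d.contains e then d.insert e (d.getD e 0 + 1) else d.insert e 1)
    PySem.Dict.empty

theorem countB_take (arr : List Int) (m : Int) (hm : m ≤ (arr.length : Int)) :
    (PySem.List.pyRange 0 m 1).foldl (fun d i =>
        let key := PySem.List.pyGetD arr i 0
        d.insert key (d.getD key 0 + 1)) (PySem.Dict.empty : PySem.Dict Int Int)
      = (arr.take m.toNat).foldl (fun d key =>
          d.insert key (d.getD key 0 + 1)) PySem.Dict.empty :=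
  foldl_pyRange_take arr m hm
    (fun (d : PySem.Dict Int Int) key => d.insert key (d.getD key 0 + 1)) PySem.Dict.empty

theorem decB_take (arr : List Int) (n : Int) (hn : n ≤ (arr.length : Int))
    (init : PySem.Dict Int Int) :
    (PySem.List.pyRange 0 n 1).foldl (fun d i =>
        let key := PySem.List.pyGetD arr i 0
        if d.contains key then d.insert key (d.getD key 0 - 1) else d) init
      = (arr.take n.toNat).foldl (fun d key =>
          if d.contains key then d.insert key (d.getD key 0 - 1) else d) init :=
  foldl_pyRange_take arr n hn
    (fun d key => if d.contains key then d.insert key (d.getD key 0 - 1) else d) init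

-- A's dict builder over a plain list IS Counter
theorem setDict_list_eq_counter (l : List Int) :
    l.foldl (fun d e =>
      if d.contains e then d.insert e (d.getD e 0 + 1) else d.insert e 1) PySem.Dict.empty
      = PySem.Dict.counter l := by
  rw [← PySem.Dict.foldl_insert_getD_add_one_eq_counter]
  apply PySem.List.foldl_congr_mem
  intro d e _
  by_cases hc : d.contains e
  · simp [hc]
  · rw [if_neg (by simp [hc]), PySem.Dict.getD_of_not_contains d 0 (by simpa using hc)]
    norm_num

-- A's early-return key loop as an 'all' test
theorem checkKeysLoop_eq (keys : List Int) (d1 d2 : PySem.Dict Int Int) :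
    checkKeysLoop keys d1 d2 =
      if keys.all (fun k => d1.contains k && (d1.getD k 0 == d2.getD k 0)) then "Yes" else "No" := by
  induction keys with
  | nil => simp [checkKeysLoop]
  | cons k rest ih =>
    simp only [checkKeysLoop, List.all_cons, ih]
    by_cases h1 : d1.contains k
    · by_cases h2 : d1.getD k 0 = d2.getD k 0 <;> simp [h1, h2]
    · simp [Bool.not_eq_true] at h1
      simp [h1]

-- the decrement pass: keys are preserved
theorem decFold_keys (l : List Int) (d : PySem.Dict Int Int) :
    (l.foldl (fun d key =>
      if d.contains key then d.insert key (d.getD key 0 - 1) else d) d).keys = d.keys := by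
  induction l generalizing d with
  | nil => rfl
  | cons x t ih =>
    simp only [List.foldl_cons]
    by_cases hc : d.contains x
    · rw [ih]; simp [hc, PySem.Dict.keys_insert_of_contains d _ hc]
    · simp [hc, ih]

-- the decrement pass: the value at a key of d drops by that key's count in l
theorem decFold_getD (l : List Int) (d : PySem.Dict Int Int) (k : Int) (hk : k ∈ d.keys) :
    (l.foldl (fun d key =>
      if d.contains key then d.insert key (d.getD key 0 - 1) else d) d).getD k 0
      = d.getD k 0 - (l.count k : Int) := by
  induction l generalizing d with
  | nil => simp
  | cons x t ih =>
    simp only [List.foldl_cons]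
    by_cases hc : d.contains x
    · rw [if_pos hc]
      have hk' : k ∈ (d.insert x (d.getD x 0 - 1)).keys := by
        rw [PySem.Dict.keys_insert_of_contains d _ hc]; exact hk
      rw [ih _ hk', PySem.Dict.getD_insert]
      by_cases hxk : k = x
      · subst hxk; simp; omega
      · rw [if_neg hxk]
        have hne : x ≠ k := fun h => hxk h.symm
        simp [hne]
    · rw [if_neg hc, ih _ hk]
      have hxk : x ≠ k := by
        intro h; subst h
        exact hc ((PySem.Dict.contains_iff_mem_keys d x).mpr hk)
      simp [hxk]

-- ===== VERDICT (by name: the statement is the Claim_ definition above) =====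
theorem subset_another_array_spec : Claim_equal_subset_another_array := by
  intro arr1 arr2 n m _ hpre
  obtain ⟨h1, h2⟩ := hpre
  unfold Spec_subset_another_array subset_another_array subset_another_array_alt setDictFromArr
  dsimp only
  rw [setDict_take arr1 n h1, setDict_take arr2 m h2,
      countB_take arr2 m h2, decB_take arr1 n h1,
      setDict_list_eq_counter, setDict_list_eq_counter,
      PySem.Dict.foldl_insert_getD_add_one_eq_counter, checkKeysLoop_eq]
  set xs := arr1.take n.toNat with hxs
  set ys := arr2.take m.toNat with hys
  set D := xs.foldl
      (fun d key => if d.contains key then d.insert key (d.getD key 0 - 1) else d)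
      (PySem.Dict.counter ys) with hD
  have hkD : D.keys = PySem.Set.ofList ys := by
    rw [hD, decFold_keys, PySem.Dict.keys_counter]
  have hnd : D.keys.Nodup := by rw [hkD]; exact PySem.Set.nodup_ofList ys
  have hv : D.values = D.keys.map (fun k => D.getD k 0) :=
    PySem.Dict.values_eq_map_keys D hnd 0
  have hb : (PySem.Dict.counter ys).keys.all
        (fun k => (PySem.Dict.counter xs).contains k
          && ((PySem.Dict.counter xs).getD k 0 == (PySem.Dict.counter ys).getD k 0))
      = D.values.all (fun v => v == 0) := by
    rw [hv, List.all_map, hkD, PySem.Dict.keys_counter]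
    rw [Bool.eq_iff_iff]
    simp only [List.all_eq_true]
    refine forall_congr' fun k => imp_congr_right fun hk => ?_
    have hky : k ∈ ys := (PySem.Set.mem_ofList ys k).mp hk
    have hmemD : k ∈ (PySem.Dict.counter ys).keys := by
      rw [PySem.Dict.keys_counter]; exact hk
    have hgd : D.getD k 0 = (ys.count k : Int) - (xs.count k : Int) := by
      rw [hD, decFold_getD _ _ _ hmemD, PySem.Dict.getD_counter]
    have hcy : 0 < ys.count k := List.count_pos_iff.mpr hky
    simp only [Function.comp, hgd, PySem.Dict.contains_counter, PySem.Dict.getD_counter,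
      Bool.and_eq_true, beq_iff_eq, List.contains_eq_mem, decide_eq_true_eq]
    constructor
    · rintro ⟨_, hcnt⟩; omega
    · intro h
      have hcx : 0 < xs.count k := by omega
      exact ⟨List.count_pos_iff.mp hcx, by omega⟩
  rw [hb]
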